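-- pv_equiv track=rewrite | github.com/andyruddh/Multi-Layer-Perceptron-Experiments | classes/geo.py | closest_two_points
-- ===== SOURCE A (Python) =====
-- import math
-- import copy
--
-- def closest_two_points(origin, points, R_c, intersections):
--     # 创建points、R_c和intersections的副本
--     points_copy = copy.deepcopy(points)
--     R_c_copy = copy.deepcopy(R_c)
--     intersections_copy = copy.deepcopy(intersections)
--
--      # 如果points列表只有一个值，返回updated_points, updated_rc, updated_intersections
--     if len(points) == 1:
--         return points_copy, R_c_copy, intersections_copy, points_copy, R_c_copy, intersections_copy
--
--     # 将点、R_c和intersections值打包在一起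
--     point_rc_int_pairs = list(zip(points_copy, R_c_copy, intersections_copy))
--
--     # 初始化最小距离和最近点坐标
--     min_distances = [(float('inf'), None), (float('inf'), None)]  # (distance, (point, rc, intersection))
--
--     # 遍历点集合
--     for point, rc, intersection in point_rc_int_pairs:
--         # 计算当前点到原点的距离
--         distance = math.sqrt((point[0] - origin[0])**2 + (point[1] - origin[1])**2)
--
--         # 如果当前距离比已知的最小距离还小，更新最小距离和最近点坐标
--         if distance < min_distances[0][0]:
--             min_distances[1] = min_distances[0]
--             min_distances[0] = (distance, (point, rc, intersection))
--         elif distance < min_distances[1][0]: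
--             min_distances[1] = (distance, (point, rc, intersection))
--
--     # 提取最近的两个点及其对应的R_c和intersections值
--     closest_points_rc_int = [min_distances[0][1], min_distances[1][1]]
--     closest_points = [closest_points_rc_int[0][0], closest_points_rc_int[1][0]]
--     closest_rc = [closest_points_rc_int[0][1], closest_points_rc_int[1][1]]
--     closest_intersections = [closest_points_rc_int[0][2], closest_points_rc_int[1][2]]
--
--     # 从副本列表中剔除最近的一个点及其对应的R_c值和intersections值
--     points_copy.remove(closest_points[0])
--     R_c_copy.remove(closest_rc[0])
--     intersections_copy.remove(closest_intersections[0])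
--
--     return closest_points, closest_rc, closest_intersections, points_copy, R_c_copy, intersections_copy
-- ===== SOURCE B (Python) =====
-- import math
-- import copy
--
--
-- def closest_two_points(origin, points, R_c, intersections):
--     points_copy = copy.deepcopy(points)
--     R_c_copy = copy.deepcopy(R_c)
--     intersections_copy = copy.deepcopy(intersections)
--
--     if len(points) == 1:
--         return points_copy, R_c_copy, intersections_copy, points_copy, R_c_copy, intersections_copy
--
--     # stable sort of the zipped triples by Euclidean distance to origin;
--     # the first two are the two closest (ties keep original order, as in A)
--     triples = sorted(
--         zip(points_copy, R_c_copy, intersections_copy),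
--         key=lambda t: math.sqrt((t[0][0] - origin[0]) ** 2 + (t[0][1] - origin[1]) ** 2),
--     )
--     (p0, rc0, i0), (p1, rc1, i1) = triples[0], triples[1]
--
--     points_copy.remove(p0)
--     R_c_copy.remove(rc0)
--     intersections_copy.remove(i0)
--
--     return [p0, p1], [rc0, rc1], [i0, i1], points_copy, R_c_copy, intersections_copy
-- ===== Notes on version B (the rewrite author's own statement) =====
-- stated objective: simpler
-- what changed: Replaces A's hand-rolled single-pass two-minimum tracker (the (inf,None) sentinel pair with shift-down updates) by a stable sorted(key=distance) of the zipped triples followed by taking the first two; stability reproduces A's strict-< tie order exactly.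
import Mathlib
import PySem

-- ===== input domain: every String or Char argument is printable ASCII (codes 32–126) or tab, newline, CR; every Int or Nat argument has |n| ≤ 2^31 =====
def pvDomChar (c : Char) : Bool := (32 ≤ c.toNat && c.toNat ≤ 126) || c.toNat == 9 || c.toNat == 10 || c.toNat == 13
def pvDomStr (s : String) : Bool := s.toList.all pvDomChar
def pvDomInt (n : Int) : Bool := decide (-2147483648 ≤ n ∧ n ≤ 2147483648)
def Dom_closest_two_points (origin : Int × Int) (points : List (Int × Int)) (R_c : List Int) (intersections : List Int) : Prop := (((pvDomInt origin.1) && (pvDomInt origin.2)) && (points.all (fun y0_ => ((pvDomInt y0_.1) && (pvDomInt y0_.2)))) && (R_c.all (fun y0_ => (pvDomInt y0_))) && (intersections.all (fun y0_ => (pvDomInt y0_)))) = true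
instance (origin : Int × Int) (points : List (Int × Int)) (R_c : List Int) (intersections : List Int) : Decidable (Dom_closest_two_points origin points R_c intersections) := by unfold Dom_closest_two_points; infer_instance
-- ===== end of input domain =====

-- B replaces A's hand-rolled two-minimum tracker by a stable sort on distance and taking the
-- first two triples (objective: simpler); return values proved equal on Pre_ (A deepcopies, so
-- neither program mutates its arguments).

-- ===== PORT A =====
-- Shared helper: both Pythons compute math.sqrt((px-ox)**2 + (py-oy)**2) and only COMPARE the
-- results.  pvSqrtKey n is a strictly order-isomorphic Int encoding (binade*2^53 + mantissa) of
-- the IEEE-754 double math.sqrt(float(n)) for 0 <= n: float(n) is n rounded to 53 bits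
-- (ties-to-even), then the correctly rounded square root (never a tie, since (s+1/2)^2 is not an
-- integer); so d1 < d2 / d1 == d2 on these keys holds iff it holds on CPython's floats.
def pvRound53 (n : Nat) : Nat × Nat :=
  let bl := n.log2 + 1
  if bl ≤ 53 then (n, 0) else
    let e := bl - 53
    let q := n / 2 ^ e
    let r := n % 2 ^ e
    let half := 2 ^ (e - 1)
    let m := if half < r ∨ (r = half ∧ q % 2 = 1) then q + 1 else q
    if m = 2 ^ 53 then (2 ^ 52, e + 1) else (m, e)

def pvSqrtKey (n : Nat) : Int :=
  if n = 0 then -(2 ^ 62) else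
    let me := pvRound53 n
    let B : Int := (me.1.log2 : Int) + 1 + (me.2 : Int)
    let er := PySem.Int.floordiv (B - 105) 2
    let N := me.1 <<< ((me.2 : Int) - 2 * er).toNat
    let s0 := N.sqrt
    let mr := if N ≤ s0 * s0 + s0 then s0 else s0 + 1
    if mr = 2 ^ 53 then (er + 1) * 2 ^ 53 + 2 ^ 52 else er * 2 ^ 53 + (mr : Int)

-- distance = math.sqrt((point[0]-origin[0])**2 + (point[1]-origin[1])**2), as its key encoding
def pvDist (origin : Int × Int) (p : Int × Int) : Int :=
  pvSqrtKey ((p.1 - origin.1) ^ 2 + (p.2 - origin.2) ^ 2).toNat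

-- 'distance < slot' where a 'none' slot is A's (float('inf'), None) sentinel
def pvLt (d : Int) (o : Option (Int × ((Int × Int) × Int × Int))) : Bool :=
  match o with
  | none => true
  | some q => decide (d < q.1)

-- one iteration of A's loop over min_distances = (slot0, slot1)
def pvStep (origin : Int × Int)
    (st : Option (Int × ((Int × Int) × Int × Int)) × Option (Int × ((Int × Int) × Int × Int)))
    (t : (Int × Int) × Int × Int) :
    Option (Int × ((Int × Int) × Int × Int)) × Option (Int × ((Int × Int) × Int × Int)) :=
  let d := pvDist origin t.1
  if pvLt d st.1 then (some (d, t), st.1)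
  else if pvLt d st.2 then (st.1, some (d, t))
  else st

def closest_two_points (origin : Int × Int) (points : List (Int × Int)) (R_c : List Int) (intersections : List Int) : (List (Int × Int)) × List Int × List Int × (List (Int × Int)) × List Int × List Int :=
  if points.length = 1 then (points, R_c, intersections, points, R_c, intersections)
  else
    let pairs := points.zip (R_c.zip intersections)
    match pairs.foldl (pvStep origin) (none, none) with
    | (some q0, some q1) =>
        ([q0.2.1, q1.2.1], [q0.2.2.1, q1.2.2.1], [q0.2.2.2, q1.2.2.2],
         (PySem.List.remove? points q0.2.1).getD points,
         (PySem.List.remove? R_c q0.2.2.1).getD R_c,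
         (PySem.List.remove? intersections q0.2.2.2).getD intersections)
    | _ => ([], [], [], [], [], [])   -- Python indexes None here and raises TypeError; outside Pre_

-- ===== PORT B =====
def closest_two_points_alt (origin : Int × Int) (points : List (Int × Int)) (R_c : List Int) (intersections : List Int) : (List (Int × Int)) × List Int × List Int × (List (Int × Int)) × List Int × List Int :=
  if points.length = 1 then (points, R_c, intersections, points, R_c, intersections)
  else
    match PySem.List.sorted (points.zip (R_c.zip intersections)) (fun t => pvDist origin t.1) with
    | t0 :: t1 :: _ =>
        ([t0.1, t1.1], [t0.2.1, t1.2.1], [t0.2.2, t1.2.2],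
         (PySem.List.remove? points t0.1).getD points,
         (PySem.List.remove? R_c t0.2.1).getD R_c,
         (PySem.List.remove? intersections t0.2.2).getD intersections)
    | _ => ([], [], [], [], [], [])   -- Python's triples[1] raises IndexError here; outside Pre_

-- ===== PRECONDITION & SPEC =====
-- Pre_ excludes exactly the inputs where A raises TypeError (fewer than two zipped triples and
-- len(points) != 1: the None sentinel gets indexed).
def Pre_closest_two_points (origin : Int × Int) (points : List (Int × Int)) (R_c : List Int) (intersections : List Int) : Prop :=
  points.length = 1 ∨ (2 ≤ points.length ∧ 2 ≤ R_c.length ∧ 2 ≤ intersections.length)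
instance (origin : Int × Int) (points : List (Int × Int)) (R_c : List Int) (intersections : List Int) : Decidable (Pre_closest_two_points origin points R_c intersections) := by unfold Pre_closest_two_points; infer_instance

def pvWitness_closest_two_points : (Int × Int) × (List (Int × Int)) × List Int × List Int :=
  ((0, 0), [(1, 2), (3, 4)], [5, 6], [7, 8])

def Spec_closest_two_points (origin : Int × Int) (points : List (Int × Int)) (R_c : List Int) (intersections : List Int) (out : (List (Int × Int)) × List Int × List Int × (List (Int × Int)) × List Int × List Int) : Prop := out = closest_two_points_alt origin points R_c intersections
instance (origin : Int × Int) (points : List (Int × Int)) (R_c : List Int) (intersections : List Int) (out : (List (Int × Int)) × List Int × List Int × (List (Int × Int)) × List Int × List Int) : Decidable (Spec_closest_two_points origin points R_c intersections out) := by unfold Spec_closest_two_points; infer_instance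

-- ===== CLAIM (what is proved, stated in full; the proofs are below) =====
def Claim_equal_closest_two_points : Prop := ∀ (origin : Int × Int) (points : List (Int × Int)) (R_c : List Int) (intersections : List Int), Dom_closest_two_points origin points R_c intersections → Pre_closest_two_points origin points R_c intersections → Spec_closest_two_points origin points R_c intersections (closest_two_points origin points R_c intersections)

-- ===== LEMMAS AND PROOFS =====
-- the first two entries of a list, in A's (distance, triple) slot format
def pvTop2 (k : ((Int × Int) × Int × Int) → Int) (s : List ((Int × Int) × Int × Int)) :
    Option (Int × ((Int × Int) × Int × Int)) × Option (Int × ((Int × Int) × Int × Int)) :=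
  match s with
  | [] => (none, none)
  | [a] => (some (k a, a), none)
  | a :: b :: _ => (some (k a, a), some (k b, b))

-- one step of A's loop acts on the first two slots exactly as a stable insertion does
lemma pvStep_insertBy (origin : Int × Int) (x : (Int × Int) × Int × Int)
    (s : List ((Int × Int) × Int × Int)) :
    pvStep origin (pvTop2 (fun t => pvDist origin t.1) s) x
      = pvTop2 (fun t => pvDist origin t.1)
          (PySem.List.insertBy (fun a b => decide (pvDist origin a.1 < pvDist origin b.1)) x s) := by
  match s with
  | [] => simp [pvStep, pvTop2, pvLt, PySem.List.insertBy]
  | [a] =>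
      by_cases h : pvDist origin x.1 < pvDist origin a.1 <;>
        simp [pvStep, pvTop2, pvLt, PySem.List.insertBy, h]
  | a :: b :: rest =>
      by_cases h0 : pvDist origin x.1 < pvDist origin a.1
      · simp [pvStep, pvTop2, pvLt, PySem.List.insertBy, h0]
      · by_cases h1 : pvDist origin x.1 < pvDist origin b.1 <;>
          simp [pvStep, pvTop2, pvLt, PySem.List.insertBy, h0, h1]

-- A's whole loop computes the first two slots of the insertion-sorted list
lemma pvFoldl_top2 (origin : Int × Int) (l s : List ((Int × Int) × Int × Int)) :
    l.foldl (pvStep origin) (pvTop2 (fun t => pvDist origin t.1) s)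
      = pvTop2 (fun t => pvDist origin t.1)
          (l.foldl (fun acc x =>
            PySem.List.insertBy (fun a b => decide (pvDist origin a.1 < pvDist origin b.1)) x acc) s) := by
  induction l generalizing s with
  | nil => rfl
  | cons x xs ih =>
      simp only [List.foldl_cons, pvStep_insertBy]
      exact ih _

-- ===== VERDICT (by name: the statement is the Claim_ definition above) =====
theorem closest_two_points_spec : Claim_equal_closest_two_points := by
  intro origin points R_c intersections _hDom hPre
  unfold Spec_closest_two_points closest_two_points closest_two_points_alt
  by_cases h1 : points.length = 1
  · simp [h1]
  · simp only [h1, if_false]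
    obtain ⟨h2, h3, h4⟩ : 2 ≤ points.length ∧ 2 ≤ R_c.length ∧ 2 ≤ intersections.length := by
      rcases hPre with h | h
      · exact absurd h h1
      · exact h
    have hfold := pvFoldl_top2 origin (points.zip (R_c.zip intersections)) []
    have hsorted : PySem.List.sorted (points.zip (R_c.zip intersections)) (fun t => pvDist origin t.1)
        = (points.zip (R_c.zip intersections)).foldl (fun acc x =>
            PySem.List.insertBy (fun a b => decide (pvDist origin a.1 < pvDist origin b.1)) x acc) [] :=
      PySem.List.sorted_eq_foldl_insertBy _ _
    have hlen : 2 ≤ (PySem.List.sorted (points.zip (R_c.zip intersections)) (fun t => pvDist origin t.1)).length := by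
      rw [PySem.List.length_sorted]
      simp [List.length_zip]
      omega
    rcases hs : PySem.List.sorted (points.zip (R_c.zip intersections)) (fun t => pvDist origin t.1) with
      _ | ⟨t0, _ | ⟨t1, rest⟩⟩
    · rw [hs] at hlen; simp at hlen
    · rw [hs] at hlen; simp at hlen
    · have hst : (points.zip (R_c.zip intersections)).foldl (pvStep origin) (none, none)
          = (some (pvDist origin t0.1, t0), some (pvDist origin t1.1, t1)) := by
        calc (points.zip (R_c.zip intersections)).foldl (pvStep origin) (none, none)
            = pvTop2 (fun t => pvDist origin t.1)
                ((points.zip (R_c.zip intersections)).foldl (fun acc x =>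
                  PySem.List.insertBy (fun a b => decide (pvDist origin a.1 < pvDist origin b.1)) x acc) []) := hfold
          _ = pvTop2 (fun t => pvDist origin t.1) (t0 :: t1 :: rest) := by rw [← hsorted, hs]
          _ = (some (pvDist origin t0.1, t0), some (pvDist origin t1.1, t1)) := rfl
      rw [hst]
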